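-- pv_equiv track=rewrite | github.com/wwang2/no-three-in-line-agile-finch | orbits/01-algebraic-local-search/solution.py | _has_collinear_triple_with
-- ===== SOURCE A (Python) =====
-- def _cross(o, a, b):
--     """Integer cross product (a-o) x (b-o). Zero iff o,a,b collinear."""
--     return (a[0] - o[0]) * (b[1] - o[1]) - (a[1] - o[1]) * (b[0] - o[0])
--
-- def _has_collinear_triple_with(points, new_point):
--     """Return True iff adding new_point would create a collinear triple."""
--     pts = points
--     n = len(pts)
--     for i in range(n):
--         for j in range(i + 1, n):
--             if _cross(pts[i], pts[j], new_point) == 0: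
--                 return True
--     return False
-- ===== SOURCE B (Python) =====
-- def _gcd(a, b):
--     """Euclid's algorithm on nonnegative integers."""
--     while b:
--         a, b = b, a % b
--     return a
--
--
-- def _has_collinear_triple_with(points, new_point):
--     """Return True iff adding new_point would create a collinear triple.
--
--     O(n): two existing points are collinear with new_point iff their
--     direction vectors from new_point are parallel, i.e. have the same
--     canonical (primitive, sign-normalized) form; hash the canonical
--     directions and report a collision.  A point equal to new_point is
--     collinear with every other point, so it yields True as soon as a
--     pair exists at all (n >= 2).
--     """
--     n = len(points)
--     if n < 2:
--         return False
--     x0, y0 = new_point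
--     seen = set()
--     for (x, y) in points:
--         dx = x - x0
--         dy = y - y0
--         if dx == 0 and dy == 0:
--             return True
--         g = _gcd(abs(dx), abs(dy))
--         dx //= g
--         dy //= g
--         if dx < 0 or (dx == 0 and dy < 0):
--             dx = -dx
--             dy = -dy
--         if (dx, dy) in seen:
--             return True
--         seen.add((dx, dy))
--     return False
-- ===== Notes on version B (the rewrite author's own statement) =====
-- stated objective: faster
-- what changed: Replaced the O(n^2) scan over all pairs of existing points by a single pass that canonicalizes each point's direction vector from new_point (divide by gcd, fix sign) and reports a hash-set collision, with an immediate True for a point equal to new_point when a pair exists.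
import Mathlib
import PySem

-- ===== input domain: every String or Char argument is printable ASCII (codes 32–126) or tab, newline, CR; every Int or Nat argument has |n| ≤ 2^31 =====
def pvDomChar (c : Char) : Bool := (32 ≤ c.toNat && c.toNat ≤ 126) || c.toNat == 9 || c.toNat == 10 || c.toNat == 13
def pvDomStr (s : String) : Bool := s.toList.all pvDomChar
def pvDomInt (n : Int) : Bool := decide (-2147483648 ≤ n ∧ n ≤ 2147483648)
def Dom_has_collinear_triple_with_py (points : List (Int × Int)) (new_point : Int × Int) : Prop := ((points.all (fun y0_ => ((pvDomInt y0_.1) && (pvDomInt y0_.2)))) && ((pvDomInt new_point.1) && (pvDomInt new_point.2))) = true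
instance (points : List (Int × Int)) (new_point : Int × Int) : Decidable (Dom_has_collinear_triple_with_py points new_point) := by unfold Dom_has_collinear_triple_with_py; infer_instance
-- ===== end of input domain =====

-- B replaces A's O(n^2) pair scan by one pass hashing canonical (gcd-reduced, sign-fixed)
-- direction vectors from new_point: a collision (or a point equal to new_point, given n ≥ 2) means collinear.

-- ===== PORT A =====
def crossPy (o a b : Int × Int) : Int :=
  (a.1 - o.1) * (b.2 - o.2) - (a.2 - o.2) * (b.1 - o.1)

def aInner (pts : List (Int × Int)) (np pi_ : Int × Int) (j n : Nat) : Bool :=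
  if j < n then
    if crossPy pi_ (PySem.List.pyGetD pts (j : Int) (0, 0)) np = 0 then true
    else aInner pts np pi_ (j + 1) n
  else false
termination_by n - j

def aOuter (pts : List (Int × Int)) (np : Int × Int) (i n : Nat) : Bool :=
  if i < n then
    if aInner pts np (PySem.List.pyGetD pts (i : Int) (0, 0)) (i + 1) n then true
    else aOuter pts np (i + 1) n
  else false
termination_by n - i

def has_collinear_triple_with_py (points : List (Int × Int)) (new_point : Int × Int) : Bool :=
  aOuter points new_point 0 points.length

-- ===== PORT B =====
def gcdLoop (a b : Nat) : Nat :=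
  if h : b = 0 then a else gcdLoop b (a % b)
termination_by b
decreasing_by exact Nat.mod_lt _ (Nat.pos_of_ne_zero h)

def altLoop (x0 y0 : Int) (l : List (Int × Int)) (seen : PySem.Set (Int × Int)) : Bool :=
  match l with
  | [] => false
  | (x, y) :: rest =>
    let dx := x - x0
    let dy := y - y0
    if dx = 0 ∧ dy = 0 then true
    else
      let g : Int := (gcdLoop dx.natAbs dy.natAbs : Nat)
      let dx' := PySem.Int.floordiv dx g
      let dy' := PySem.Int.floordiv dy g
      let d := if dx' < 0 ∨ (dx' = 0 ∧ dy' < 0) then (-dx', -dy') else (dx', dy')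
      if PySem.Set.contains seen d then true
      else altLoop x0 y0 rest (PySem.Set.add seen d)

def has_collinear_triple_with_py_alt (points : List (Int × Int)) (new_point : Int × Int) : Bool :=
  if points.length < 2 then false
  else altLoop new_point.1 new_point.2 points PySem.Set.empty

-- ===== PRECONDITION & SPEC =====
def Spec_has_collinear_triple_with_py (points : List (Int × Int)) (new_point : Int × Int) (out : Bool) : Prop := out = has_collinear_triple_with_py_alt points new_point
instance (points : List (Int × Int)) (new_point : Int × Int) (out : Bool) : Decidable (Spec_has_collinear_triple_with_py points new_point out) := by unfold Spec_has_collinear_triple_with_py; infer_instance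

-- ===== CLAIM (what is proved, stated in full; the proofs are below) =====
def Claim_equal_has_collinear_triple_with_py : Prop := ∀ (points : List (Int × Int)) (new_point : Int × Int), Dom_has_collinear_triple_with_py points new_point → Spec_has_collinear_triple_with_py points new_point (has_collinear_triple_with_py points new_point)

-- ===== LEMMAS AND PROOFS =====

-- canonical (primitive, sign-normalized) representative of a nonzero direction
def canonV (u : Int × Int) : Int × Int :=
  let g : Int := Int.gcd u.1 u.2
  let p := u.1 / g
  let q := u.2 / g
  if p < 0 ∨ (p = 0 ∧ q < 0) then (-p, -q) else (p, q)

def dirV (np p : Int × Int) : Int × Int := (p.1 - np.1, p.2 - np.2)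

def anyPair (R : (Int × Int) → (Int × Int) → Bool) : List (Int × Int) → Bool
  | [] => false
  | x :: xs => xs.any (R x) || anyPair R xs

theorem gcdLoop_eq (a b : Nat) : gcdLoop a b = Nat.gcd b a := by
  induction a, b using gcdLoop.induct with
  | case1 a => rw [gcdLoop]; simp
  | case2 a b h ih => rw [gcdLoop]; simp only [h, dite_false]; rw [ih]; exact (Nat.gcd_rec b a).symm

theorem pyGetD_idx (l : List (Int × Int)) (j : Nat) (h : j < l.length) (d : Int × Int) :
    PySem.List.pyGetD l (j : Int) d = l[j] := by
  simp [PySem.List.pyGetD_natCast, List.getD_eq_getElem?_getD, h]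

theorem aInner_eq (pts : List (Int × Int)) (np pi_ : Int × Int) (j : Nat) :
    aInner pts np pi_ j pts.length
      = (pts.drop j).any (fun q => decide (crossPy pi_ q np = 0)) := by
  suffices H : ∀ k j, pts.length - j = k → aInner pts np pi_ j pts.length
      = (pts.drop j).any (fun q => decide (crossPy pi_ q np = 0)) from H _ j rfl
  intro k
  induction k with
  | zero =>
    intro j hk
    have hj : ¬ j < pts.length := by omega
    have hd : pts.drop j = [] := List.drop_eq_nil_of_le (by omega)
    rw [aInner]; simp [hj, hd]
  | succ k ih =>
    intro j hk
    have hj : j < pts.length := by omega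
    rw [aInner]
    simp only [hj, if_true, pyGetD_idx pts j hj]
    rw [List.drop_eq_getElem_cons hj, List.any_cons, ih (j+1) (by omega)]
    by_cases hc : crossPy pi_ pts[j] np = 0 <;> simp [hc]

theorem aOuter_eq (pts : List (Int × Int)) (np : Int × Int) (i : Nat) :
    aOuter pts np i pts.length
      = anyPair (fun p q => decide (crossPy p q np = 0)) (pts.drop i) := by
  suffices H : ∀ k i, pts.length - i = k → aOuter pts np i pts.length
      = anyPair (fun p q => decide (crossPy p q np = 0)) (pts.drop i) from H _ i rfl
  intro k
  induction k with
  | zero =>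
    intro i hk
    have hi : ¬ i < pts.length := by omega
    have hd : pts.drop i = [] := List.drop_eq_nil_of_le (by omega)
    rw [aOuter]; simp [hi, hd, anyPair]
  | succ k ih =>
    intro i hk
    have hi : i < pts.length := by omega
    rw [aOuter]
    simp only [hi, if_true, pyGetD_idx pts i hi]
    rw [List.drop_eq_getElem_cons hi]
    simp only [anyPair]
    rw [aInner_eq, ih (i+1) (by omega)]
    by_cases hc : (pts.drop (i+1)).any (fun q => decide (crossPy pts[i] q np = 0)) <;> simp [hc]

theorem anyPair_iff (R : (Int × Int) → (Int × Int) → Bool) (l : List (Int × Int)) :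
    anyPair R l = true ↔ ∃ p q, [p, q].Sublist l ∧ R p q = true := by
  induction l with
  | nil =>
    simp only [anyPair]
    constructor
    · intro h; cases h
    · rintro ⟨p, q, hs, -⟩; have := hs.length_le; simp at this
  | cons x xs ih =>
    simp only [anyPair, Bool.or_eq_true, List.any_eq_true, ih]
    constructor
    · rintro (⟨q, hq, hR⟩ | ⟨p, q, hs, hR⟩)
      · exact ⟨x, q, (List.singleton_sublist.mpr hq).cons₂ x, hR⟩
      · exact ⟨p, q, hs.cons x, hR⟩
    · rintro ⟨p, q, hs, hR⟩
      rcases List.sublist_cons_iff.mp hs with h | ⟨r, hr, hrs⟩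
      · exact Or.inr ⟨p, q, h, hR⟩
      · cases hr
        exact Or.inl ⟨q, List.singleton_sublist.mp hrs, hR⟩

theorem companion (l : List (Int × Int)) (p : Int × Int) (hl : 2 ≤ l.length) (hp : p ∈ l) :
    ∃ q, [p, q].Sublist l ∨ [q, p].Sublist l := by
  induction l with
  | nil => simp at hp
  | cons x xs ih =>
    rcases List.mem_cons.mp hp with rfl | hpx
    · rcases xs with _ | ⟨y, ys⟩
      · simp at hl
      · exact ⟨y, Or.inl (by simp [List.cons_sublist_cons])⟩
    · by_cases h2 : 2 ≤ xs.length
      · obtain ⟨q, h | h⟩ := ih h2 hpx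
        · exact ⟨q, Or.inl (h.cons x)⟩
        · exact ⟨q, Or.inr (h.cons x)⟩
      · rcases xs with _ | ⟨y, ys⟩
        · simp at hpx
        rcases ys with _ | ⟨z, zs⟩
        · have : p = y := by simpa using hpx
          subst this
          exact ⟨x, Or.inr (List.Sublist.refl _)⟩
        · exfalso; simp at h2

theorem canon_spec (u : Int × Int) (hu : u ≠ (0, 0)) :
    ∃ s : Int, s ≠ 0 ∧ u.1 = s * (canonV u).1 ∧ u.2 = s * (canonV u).2 ∧
      Int.gcd (canonV u).1 (canonV u).2 = 1 ∧
      (0 < (canonV u).1 ∨ ((canonV u).1 = 0 ∧ 0 < (canonV u).2)) := by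
  obtain ⟨a, b⟩ := u
  have hab : a ≠ 0 ∨ b ≠ 0 := by
    by_contra h; push_neg at h; exact hu (by simp [h.1, h.2])
  set gn : Nat := Int.gcd a b with hgn
  have hgpos : 0 < gn := Int.gcd_pos_iff.mpr hab
  set g : Int := (gn : Int) with hg
  have hgz : g ≠ 0 := by positivity
  have hga : g ∣ a := by rw [hg, hgn]; exact Int.gcd_dvd_left a b
  have hgb : g ∣ b := by rw [hg, hgn]; exact Int.gcd_dvd_right a b
  have ha : g * (a / g) = a := Int.mul_ediv_cancel' hga
  have hb : g * (b / g) = b := Int.mul_ediv_cancel' hgb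
  have hcop : Int.gcd (a / g) (b / g) = 1 := Int.gcd_div_gcd_div_gcd hgpos
  have hnz : ¬ (a / g = 0 ∧ b / g = 0) := by
    rintro ⟨h1, h2⟩
    rw [h1, mul_zero] at ha; rw [h2, mul_zero] at hb
    exact hu (by simp [← ha, ← hb])
  simp only [canonV]
  split
  · rename_i hcond
    refine ⟨-g, by simpa using hgz, by rw [mul_neg, neg_mul, neg_neg, ha], by rw [mul_neg, neg_mul, neg_neg, hb], ?_, ?_⟩
    · simpa [Int.gcd] using hcop
    · rcases hcond with h | ⟨h1, h2⟩
      · left; omega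
      · right; constructor <;> omega
  · rename_i hcond
    push_neg at hcond
    refine ⟨g, hgz, ha.symm, hb.symm, hcop, ?_⟩
    rcases lt_or_eq_of_le hcond.1 with h | h
    · exact Or.inl h
    · right
      refine ⟨h.symm, ?_⟩
      have := hcond.2 h.symm
      rcases lt_or_eq_of_le this with h2 | h2
      · exact h2
      · exact absurd ⟨h.symm, h2.symm⟩ hnz

theorem prim_eq (p q r s : Int) (h : p * s - q * r = 0)
    (hpq : Int.gcd p q = 1) (hrs : Int.gcd r s = 1)
    (h1 : 0 < p ∨ (p = 0 ∧ 0 < q)) (h2 : 0 < r ∨ (r = 0 ∧ 0 < s)) :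
    p = r ∧ q = s := by
  have h' : p * s = q * r := by omega
  by_cases hp : p = 0
  · subst hp
    have hq : q = 1 := by
      rcases h1 with h1 | ⟨-, h1⟩
      · omega
      · have : q.natAbs = 1 := by simpa [Int.gcd] using hpq
        omega
    have hr : r = 0 := by
      rw [hq] at h'; simpa using h'.symm
    subst hr
    have hs : s = 1 := by
      rcases h2 with h2 | ⟨-, h2⟩
      · omega
      · have : s.natAbs = 1 := by simpa [Int.gcd] using hrs
        omega
    simp [hq, hs]
  · have hppos : 0 < p := by rcases h1 with h1 | ⟨h1, -⟩; exact h1; exact absurd h1 hp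
    have hr : r ≠ 0 := by
      rintro rfl
      rcases h2 with h2 | ⟨-, h2⟩
      · omega
      · have : s = 0 := by
          have := h'; rw [mul_zero] at this
          exact (mul_eq_zero.mp this).resolve_left hp
        omega
    have hrpos : 0 < r := by rcases h2 with h2 | ⟨h2, -⟩; exact h2; exact absurd h2 hr
    have hcpq : IsCoprime p q := Int.isCoprime_iff_gcd_eq_one.mpr hpq
    have hcrs : IsCoprime r s := Int.isCoprime_iff_gcd_eq_one.mpr hrs
    have hpr : p ∣ r := hcpq.dvd_of_dvd_mul_left (⟨s, h'.symm⟩ : p ∣ q * r)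
    have hrp : r ∣ p := hcrs.dvd_of_dvd_mul_right (⟨q, by rw [h']; ring⟩ : r ∣ p * s)
    have hpr' : p = r := Int.dvd_antisymm (le_of_lt hppos) (le_of_lt hrpos) hpr hrp
    subst hpr'
    have : p * s = p * q := by linarith [h']
    have hqs : s = q := by
      have := mul_left_cancel₀ hp this; omega
    exact ⟨rfl, hqs.symm⟩

theorem canonV_iff (u v : Int × Int) (hu : u ≠ (0, 0)) (hv : v ≠ (0, 0)) :
    u.1 * v.2 - u.2 * v.1 = 0 ↔ canonV u = canonV v := by
  obtain ⟨s, hs0, hs1, hs2, hscop, hsnorm⟩ := canon_spec u hu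
  obtain ⟨t, ht0, ht1, ht2, htcop, htnorm⟩ := canon_spec v hv
  constructor
  · intro h
    rw [hs1, hs2, ht1, ht2] at h
    have key : (canonV u).1 * (canonV v).2 - (canonV u).2 * (canonV v).1 = 0 := by
      have hst : s * t ≠ 0 := mul_ne_zero hs0 ht0
      apply mul_left_cancel₀ hst
      rw [mul_zero]
      linear_combination h
    obtain ⟨e1, e2⟩ := prim_eq _ _ _ _ key hscop htcop hsnorm htnorm
    exact Prod.ext e1 e2
  · intro h
    rw [hs1, hs2, ht1, ht2, h]
    ring

theorem cross_dir (p q np : Int × Int) :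
    crossPy p q np = (dirV np p).1 * (dirV np q).2 - (dirV np p).2 * (dirV np q).1 := by
  simp only [crossPy, dirV]; ring

theorem dirV_eq_zero (np p : Int × Int) : dirV np p = (0, 0) ↔ p = np := by
  simp only [dirV, Prod.ext_iff]
  omega

theorem port_canon (dx dy : Int) (h : ¬(dx = 0 ∧ dy = 0)) :
    (let g : Int := (gcdLoop dx.natAbs dy.natAbs : Nat)
     let dx' := PySem.Int.floordiv dx g
     let dy' := PySem.Int.floordiv dy g
     if dx' < 0 ∨ (dx' = 0 ∧ dy' < 0) then (-dx', -dy') else (dx', dy')) = canonV (dx, dy) := by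
  have hg : (gcdLoop dx.natAbs dy.natAbs : Nat) = Int.gcd dx dy := by
    rw [gcdLoop_eq, Nat.gcd_comm]; rfl
  have hpos : 0 < ((Int.gcd dx dy : Nat) : Int) := by
    have : dx ≠ 0 ∨ dy ≠ 0 := by tauto
    exact_mod_cast Int.gcd_pos_iff.mpr this
  simp only [hg, PySem.Int.floordiv_eq_ediv_of_pos hpos, canonV]

theorem altLoop_iff (x0 y0 : Int) (l : List (Int × Int)) (seen : PySem.Set (Int × Int)) :
    altLoop x0 y0 l seen = true ↔
      (∃ p ∈ l, p = (x0, y0)) ∨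
      (∃ p ∈ l, p ≠ (x0, y0) ∧ canonV (dirV (x0, y0) p) ∈ seen) ∨
      (∃ p q, [p, q].Sublist l ∧ p ≠ (x0, y0) ∧ q ≠ (x0, y0) ∧
        canonV (dirV (x0, y0) p) = canonV (dirV (x0, y0) q)) := by
  induction l generalizing seen with
  | nil =>
    simp only [altLoop]
    constructor
    · intro h; cases h
    · rintro (⟨p, hp, -⟩ | ⟨p, hp, -⟩ | ⟨p, q, hs, -⟩)
      · cases hp
      · cases hp
      · have := hs.length_le; simp at this
  | cons xy rest ih =>
    obtain ⟨x, y⟩ := xy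
    rw [altLoop]
    by_cases hz : x - x0 = 0 ∧ y - y0 = 0
    · have hxy : (x, y) = (x0, y0) := by
        rw [Prod.mk.injEq]; omega
      simp only [hz, if_true]
      constructor
      · intro _; exact Or.inl ⟨(x, y), List.mem_cons_self, hxy⟩
      · intro _; trivial
    · have hxy : (x, y) ≠ (x0, y0) := by
        intro he; apply hz; rw [Prod.mk.injEq] at he; omega
      have hd : (let g : Int := (gcdLoop (x - x0).natAbs (y - y0).natAbs : Nat)
          let dx' := PySem.Int.floordiv (x - x0) g
          let dy' := PySem.Int.floordiv (y - y0) g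
          if dx' < 0 ∨ (dx' = 0 ∧ dy' < 0) then (-dx', -dy') else (dx', dy'))
          = canonV (dirV (x0, y0) (x, y)) := port_canon (x - x0) (y - y0) hz
      simp only [hz, if_false, hd]
      set c := canonV (dirV (x0, y0) (x, y)) with hc
      by_cases hmem : PySem.Set.contains seen c
      · simp only [hmem, if_true]
        constructor
        · intro _
          exact Or.inr (Or.inl ⟨(x, y), List.mem_cons_self, hxy, by simpa using hmem⟩)
        · intro _; trivial
      · simp only [hmem, Bool.false_eq_true, if_false]
        rw [ih]
        have hmem' : c ∉ seen := by
          intro hin; apply hmem; simpa using hin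
        constructor
        · rintro (⟨p, hp, he⟩ | ⟨p, hp, hne, hin⟩ | ⟨p, q, hs, hpne, hqne, heq⟩)
          · exact Or.inl ⟨p, List.mem_cons_of_mem _ hp, he⟩
          · rcases (PySem.Set.mem_add _ _ _).mp hin with hin | hin
            · exact Or.inr (Or.inl ⟨p, List.mem_cons_of_mem _ hp, hne, hin⟩)
            · exact Or.inr (Or.inr ⟨(x, y), p, (List.singleton_sublist.mpr hp).cons₂ _, hxy, hne, (hc ▸ hin).symm ▸ rfl⟩)
          · exact Or.inr (Or.inr ⟨p, q, hs.cons _, hpne, hqne, heq⟩)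
        · rintro (⟨p, hp, he⟩ | ⟨p, hp, hne, hin⟩ | ⟨p, q, hs, hpne, hqne, heq⟩)
          · rcases List.mem_cons.mp hp with rfl | hp
            · exact absurd he hxy
            · exact Or.inl ⟨p, hp, he⟩
          · rcases List.mem_cons.mp hp with rfl | hp
            · exact absurd hin hmem'
            · exact Or.inr (Or.inl ⟨p, hp, hne, (PySem.Set.mem_add _ _ _).mpr (Or.inl hin)⟩)
          · rcases List.sublist_cons_iff.mp hs with h | ⟨r, hr, hrs⟩
            · exact Or.inr (Or.inr ⟨p, q, h, hpne, hqne, heq⟩)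
            · cases hr
              exact Or.inr (Or.inl ⟨q, List.singleton_sublist.mp hrs, hqne,
                (PySem.Set.mem_add _ _ _).mpr (Or.inr (hc ▸ heq.symm))⟩)

-- ===== VERDICT (by name: the statement is the Claim_ definition above) =====
theorem has_collinear_triple_with_py_spec : Claim_equal_has_collinear_triple_with_py := by
  intro points np _
  obtain ⟨nx, ny⟩ := np
  unfold Spec_has_collinear_triple_with_py has_collinear_triple_with_py has_collinear_triple_with_py_alt
  rw [Bool.eq_iff_iff, aOuter_eq, List.drop_zero, anyPair_iff]
  by_cases hlen : points.length < 2
  · simp only [hlen, if_true]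
    constructor
    · rintro ⟨p, q, hs, -⟩
      have := hs.length_le; simp at this; omega
    · intro h; cases h
  · simp only [hlen, if_false]
    rw [altLoop_iff]
    have h2 : 2 ≤ points.length := by omega
    constructor
    · rintro ⟨p, q, hs, hR⟩
      rw [decide_eq_true_iff, cross_dir] at hR
      by_cases hp : p = (nx, ny)
      · exact Or.inl ⟨p, hs.subset (by simp), hp⟩
      · by_cases hq : q = (nx, ny)
        · exact Or.inl ⟨q, hs.subset (by simp), hq⟩
        · have hun : dirV (nx, ny) p ≠ (0, 0) := fun h => hp ((dirV_eq_zero _ _).mp h)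
          have hvn : dirV (nx, ny) q ≠ (0, 0) := fun h => hq ((dirV_eq_zero _ _).mp h)
          exact Or.inr (Or.inr ⟨p, q, hs, hp, hq, (canonV_iff _ _ hun hvn).mp hR⟩)
    · rintro (⟨p, hp, rfl⟩ | ⟨p, hp, hne, hin⟩ | ⟨p, q, hs, hpne, hqne, heq⟩)
      · obtain ⟨q, h | h⟩ := companion points (nx, ny) h2 hp
        · refine ⟨(nx, ny), q, h, ?_⟩
          rw [decide_eq_true_iff, cross_dir]
          have : dirV (nx, ny) (nx, ny) = (0, 0) := (dirV_eq_zero _ _).mpr rfl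
          rw [this]; ring
        · refine ⟨q, (nx, ny), h, ?_⟩
          rw [decide_eq_true_iff, cross_dir]
          have : dirV (nx, ny) (nx, ny) = (0, 0) := (dirV_eq_zero _ _).mpr rfl
          rw [this]; ring
      · exact absurd hin (by simp [PySem.Set.empty])
      · refine ⟨p, q, hs, ?_⟩
        rw [decide_eq_true_iff, cross_dir]
        have hun : dirV (nx, ny) p ≠ (0, 0) := fun h => hpne ((dirV_eq_zero _ _).mp h)
        have hvn : dirV (nx, ny) q ≠ (0, 0) := fun h => hqne ((dirV_eq_zero _ _).mp h)
        exact (canonV_iff _ _ hun hvn).mpr heq
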